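-- pv_equiv track=rewrite | github.com/kuldeep6445/project_euler_solutions | 8th_foobar.py | create_map_g
-- ===== SOURCE A (Python) =====
-- def create_map_g(dimension ,mpos, gpos ,distance):
--     final = []
--     map = [gpos[0]-mpos[0]]
--     horiz_box = int(distance/dimension[0] + 2)
--     add = [gpos[0]*2,(dimension[0]-gpos[0])*2]
--     check = 1
--     num = gpos[0]-mpos[0]
--     for i in range(horiz_box):
--         num += add[check]
--         map.append(num)
--         if check ==1:
--             check = 0
--         else:
--             check = 1
--     num = gpos[0]-mpos[0]
--     check = 0
--     for i in range(horiz_box):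
--         num -= add[check]
--         map.append(num)
--         if check ==1:
--             check = 0
--         else:
--             check = 1
--
--     verti_box = int(distance/dimension[1]+2)
--     add = [gpos[1]*2,(dimension[1]-gpos[1])*2]
--     for i in map:
--         check = 1
--         num = gpos[1]-mpos[1]
--         if i!=0:
--             final.append([i,0])
--         for j in range(verti_box):
--             num += add[check]
--             final.append([i,num])
--             if check ==1:
--                 check = 0
--             else:
--                 check = 1
--         check = 0
--         num = gpos[1]-mpos[1]
--         for j in range(verti_box):
--             num -= add[check]
--             final.append([i,num])
--             if check ==1:
--                 check = 0
--             else: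
--                 check = 1
--     return final
-- ===== SOURCE B (Python) =====
-- def create_map_g(dimension, mpos, gpos, distance):
--     # closed-form per-index coordinates instead of running num/check toggles
--     D0, D1 = dimension[0], dimension[1]
--     g0, g1 = gpos[0], gpos[1]
--     m0, m1 = mpos[0], mpos[1]
--     h = int(distance / D0 + 2)
--     v = int(distance / D1 + 2)
--
--     def fwd(D, g, m, k):
--         return (k + 1) * D - g - m if k % 2 == 1 else k * D + g - m
--
--     def bwd(D, g, m, k):
--         return -(k - 1) * D - g - m if k % 2 == 1 else -k * D + g - m
--
--     xs = ([g0 - m0]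
--           + [fwd(D0, g0, m0, t + 1) for t in range(h)]
--           + [bwd(D0, g0, m0, t + 1) for t in range(h)])
--     ysF = [fwd(D1, g1, m1, t + 1) for t in range(v)]
--     ysB = [bwd(D1, g1, m1, t + 1) for t in range(v)]
--     out = []
--     for i in xs:
--         if i != 0:
--             out.append([i, 0])
--         out += [[i, y] for y in ysF]
--         out += [[i, y] for y in ysB]
--     return out
-- ===== Notes on version B (the rewrite author's own statement) =====
-- stated objective: alternative
-- what changed: Replaces A's running num/check toggle accumulators (four stateful loops) with closed-form per-index coordinate formulas fwd/bwd computed independently for each index, assembling the grid with comprehensions/flatMap.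
import Mathlib
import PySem

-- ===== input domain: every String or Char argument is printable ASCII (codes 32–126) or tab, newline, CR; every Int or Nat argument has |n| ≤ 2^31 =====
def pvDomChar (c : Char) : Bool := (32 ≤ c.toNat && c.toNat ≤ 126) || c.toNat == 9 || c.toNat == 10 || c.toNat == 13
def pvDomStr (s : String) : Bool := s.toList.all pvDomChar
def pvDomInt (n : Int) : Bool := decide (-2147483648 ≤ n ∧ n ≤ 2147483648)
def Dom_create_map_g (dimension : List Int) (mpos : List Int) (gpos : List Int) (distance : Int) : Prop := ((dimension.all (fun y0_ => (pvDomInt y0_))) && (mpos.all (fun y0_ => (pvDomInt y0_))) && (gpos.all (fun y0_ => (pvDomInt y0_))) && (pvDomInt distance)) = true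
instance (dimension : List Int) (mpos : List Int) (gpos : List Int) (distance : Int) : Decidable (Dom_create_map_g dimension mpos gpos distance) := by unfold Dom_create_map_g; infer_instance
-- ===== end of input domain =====

-- B replaces A's two running num/check toggle accumulators with closed-form per-index
-- coordinates (objective: simpler/alternative; return value only, no mutation involved).
-- On the stated domain (|int| ≤ 2^31) Python's int(distance/dimension[k] + 2) equals
-- truncated integer division tdiv(distance + 2*dimension[k], dimension[k]); both ports use it.

-- ===== PORT A =====
-- for i in range(n): num += add[check]; map.append(num); toggle check
def pvHLoopAdd (add : List Int) : Nat → Int → Int → List Int → List Int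
  | 0, _num, _check, map => map
  | Nat.succ n, num, check, map =>
      let num' := num + (PySem.List.pyGet? add check).getD 0
      let map' := map ++ [num']
      let check' : Int := if check == 1 then 0 else 1
      pvHLoopAdd add n num' check' map'

-- for i in range(n): num -= add[check]; map.append(num); toggle check
def pvHLoopSub (add : List Int) : Nat → Int → Int → List Int → List Int
  | 0, _num, _check, map => map
  | Nat.succ n, num, check, map =>
      let num' := num - (PySem.List.pyGet? add check).getD 0
      let map' := map ++ [num']
      let check' : Int := if check == 1 then 0 else 1
      pvHLoopSub add n num' check' map'

-- for j in range(n): num += add[check]; final.append([i,num]); toggle check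
def pvVLoopAdd (add : List Int) (i : Int) : Nat → Int → Int → List (List Int) → List (List Int)
  | 0, _num, _check, final => final
  | Nat.succ n, num, check, final =>
      let num' := num + (PySem.List.pyGet? add check).getD 0
      let final' := final ++ [[i, num']]
      let check' : Int := if check == 1 then 0 else 1
      pvVLoopAdd add i n num' check' final'

-- for j in range(n): num -= add[check]; final.append([i,num]); toggle check
def pvVLoopSub (add : List Int) (i : Int) : Nat → Int → Int → List (List Int) → List (List Int)
  | 0, _num, _check, final => final
  | Nat.succ n, num, check, final =>
      let num' := num - (PySem.List.pyGet? add check).getD 0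
      let final' := final ++ [[i, num']]
      let check' : Int := if check == 1 then 0 else 1
      pvVLoopSub add i n num' check' final'

-- for i in map: (reset check/num; optional [i,0]; the two vertical toggle loops)
def pvOuter (add : List Int) (d1 : Int) (vb : Nat) : List Int → List (List Int) → List (List Int)
  | [], final => final
  | i :: rest, final =>
      let final1 := if i ≠ 0 then final ++ [[i, 0]] else final
      let final2 := pvVLoopAdd add i vb d1 1 final1
      let final3 := pvVLoopSub add i vb d1 0 final2
      pvOuter add d1 vb rest final3

def create_map_g (dimension : List Int) (mpos : List Int) (gpos : List Int) (distance : Int) : List (List Int) :=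
  let D0 := (PySem.List.pyGet? dimension 0).getD 0
  let D1 := (PySem.List.pyGet? dimension 1).getD 0
  let m0 := (PySem.List.pyGet? mpos 0).getD 0
  let m1 := (PySem.List.pyGet? mpos 1).getD 0
  let g0 := (PySem.List.pyGet? gpos 0).getD 0
  let g1 := (PySem.List.pyGet? gpos 1).getD 0
  -- int(distance/dimension[0] + 2): exact as truncated division on the |n| ≤ 2^31 domain
  let horiz_box := Int.tdiv (distance + 2 * D0) D0
  let add := [g0 * 2, (D0 - g0) * 2]
  let map0 := [g0 - m0]
  let map1 := pvHLoopAdd add horiz_box.toNat (g0 - m0) 1 map0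
  let map2 := pvHLoopSub add horiz_box.toNat (g0 - m0) 0 map1
  let verti_box := Int.tdiv (distance + 2 * D1) D1
  let addv := [g1 * 2, (D1 - g1) * 2]
  pvOuter addv (g1 - m1) verti_box.toNat map2 []

-- ===== PORT B =====
def pvFwd (D g m k : Int) : Int := if k % 2 == 1 then (k + 1) * D - g - m else k * D + g - m

def pvBwd (D g m k : Int) : Int := if k % 2 == 1 then -((k - 1) * D) - g - m else -(k * D) + g - m

def create_map_g_alt (dimension : List Int) (mpos : List Int) (gpos : List Int) (distance : Int) : List (List Int) :=
  let D0 := (PySem.List.pyGet? dimension 0).getD 0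
  let D1 := (PySem.List.pyGet? dimension 1).getD 0
  let m0 := (PySem.List.pyGet? mpos 0).getD 0
  let m1 := (PySem.List.pyGet? mpos 1).getD 0
  let g0 := (PySem.List.pyGet? gpos 0).getD 0
  let g1 := (PySem.List.pyGet? gpos 1).getD 0
  let h := Int.tdiv (distance + 2 * D0) D0
  let v := Int.tdiv (distance + 2 * D1) D1
  let xs := (g0 - m0) ::
    ((List.range h.toNat).map (fun t => pvFwd D0 g0 m0 ((t : Int) + 1)) ++
     (List.range h.toNat).map (fun t => pvBwd D0 g0 m0 ((t : Int) + 1)))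
  let ysF := (List.range v.toNat).map (fun t => pvFwd D1 g1 m1 ((t : Int) + 1))
  let ysB := (List.range v.toNat).map (fun t => pvBwd D1 g1 m1 ((t : Int) + 1))
  xs.flatMap (fun i =>
    (if i ≠ 0 then [[i, 0]] else []) ++ ysF.map (fun y => [i, y]) ++ ysB.map (fun y => [i, y]))

-- ===== PRECONDITION & SPEC =====
-- Pre_ excludes exactly the inputs where Python A raises: lists too short for the [0]/[1]
-- indexing (IndexError) or a zero dimension component (ZeroDivisionError).
def Pre_create_map_g (dimension : List Int) (mpos : List Int) (gpos : List Int) (distance : Int) : Prop :=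
  2 ≤ dimension.length ∧ 2 ≤ mpos.length ∧ 2 ≤ gpos.length ∧
  dimension.getD 0 0 ≠ 0 ∧ dimension.getD 1 0 ≠ 0
instance (dimension : List Int) (mpos : List Int) (gpos : List Int) (distance : Int) : Decidable (Pre_create_map_g dimension mpos gpos distance) := by unfold Pre_create_map_g; infer_instance

def pvWitness_create_map_g : List Int × List Int × List Int × Int := ([3, 4], [1, 1], [2, 2], 5)

def Spec_create_map_g (dimension : List Int) (mpos : List Int) (gpos : List Int) (distance : Int) (out : List (List Int)) : Prop := out = create_map_g_alt dimension mpos gpos distance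
instance (dimension : List Int) (mpos : List Int) (gpos : List Int) (distance : Int) (out : List (List Int)) : Decidable (Spec_create_map_g dimension mpos gpos distance out) := by unfold Spec_create_map_g; infer_instance

-- ===== CLAIM (what is proved, stated in full; the proofs are below) =====
def Claim_equal_create_map_g : Prop := ∀ (dimension : List Int) (mpos : List Int) (gpos : List Int) (distance : Int), Dom_create_map_g dimension mpos gpos distance → Pre_create_map_g dimension mpos gpos distance → Spec_create_map_g dimension mpos gpos distance (create_map_g dimension mpos gpos distance)

-- ===== LEMMAS AND PROOFS =====

-- check value after k steps of the "+=" loop (starts at 1) / of the "-=" loop (starts at 0)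
def pvCF (k : Nat) : Int := if k % 2 = 0 then 1 else 0
def pvCB (k : Nat) : Int := if k % 2 = 0 then 0 else 1

lemma pvFwd_step (D g m : Int) (k : Nat) :
    pvFwd D g m k + (PySem.List.pyGet? [g * 2, (D - g) * 2] (pvCF k)).getD 0
      = pvFwd D g m ((k : Int) + 1) := by
  rcases Nat.mod_two_eq_zero_or_one k with h | h
  · have h2 : (k : Int) % 2 = 0 := by omega
    have h3 : ((k : Int) + 1) % 2 = 1 := by omega
    simp [pvFwd, pvCF, PySem.List.pyGet?, PySem.List.pyIdx?, h2, h3, h]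
    ring
  · have h2 : (k : Int) % 2 = 1 := by omega
    have h3 : ((k : Int) + 1) % 2 = 0 := by omega
    simp [pvFwd, pvCF, PySem.List.pyGet?, PySem.List.pyIdx?, h2, h3, h]
    ring

lemma pvBwd_step (D g m : Int) (k : Nat) :
    pvBwd D g m k - (PySem.List.pyGet? [g * 2, (D - g) * 2] (pvCB k)).getD 0
      = pvBwd D g m ((k : Int) + 1) := by
  rcases Nat.mod_two_eq_zero_or_one k with h | h
  · have h2 : (k : Int) % 2 = 0 := by omega
    have h3 : ((k : Int) + 1) % 2 = 1 := by omega
    simp [pvBwd, pvCB, PySem.List.pyGet?, PySem.List.pyIdx?, h2, h3, h]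
    ring
  · have h2 : (k : Int) % 2 = 1 := by omega
    have h3 : ((k : Int) + 1) % 2 = 0 := by omega
    simp [pvBwd, pvCB, PySem.List.pyGet?, PySem.List.pyIdx?, h2, h3, h]
    ring

lemma pvCF_toggle (k : Nat) : (if pvCF k == 1 then (0:Int) else 1) = pvCF (k + 1) := by
  rcases Nat.mod_two_eq_zero_or_one k with h | h <;>
    simp [pvCF, h, Nat.add_mod]

lemma pvCB_toggle (k : Nat) : (if pvCB k == 1 then (0:Int) else 1) = pvCB (k + 1) := by
  rcases Nat.mod_two_eq_zero_or_one k with h | h <;>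
    simp [pvCB, h, Nat.add_mod]

lemma pvHLoopAdd_closed (D g m : Int) (n : Nat) : ∀ (k : Nat) (acc : List Int),
    pvHLoopAdd [g * 2, (D - g) * 2] n (pvFwd D g m k) (pvCF k) acc
      = acc ++ (List.range n).map (fun t => pvFwd D g m ((k + t : Nat) + 1 : Int)) := by
  induction n with
  | zero => intro k acc; simp [pvHLoopAdd]
  | succ n ih =>
    intro k acc
    rw [pvHLoopAdd, List.range_succ_eq_map]
    simp only [pvFwd_step, pvCF_toggle]
    have ih' := ih (k + 1) (acc ++ [pvFwd D g m ((k : Int) + 1)])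
    push_cast at ih'
    rw [ih']
    simp [List.map_map, Function.comp_def]
    intro t _
    congr 1
    ring

lemma pvHLoopSub_closed (D g m : Int) (n : Nat) : ∀ (k : Nat) (acc : List Int),
    pvHLoopSub [g * 2, (D - g) * 2] n (pvBwd D g m k) (pvCB k) acc
      = acc ++ (List.range n).map (fun t => pvBwd D g m ((k + t : Nat) + 1 : Int)) := by
  induction n with
  | zero => intro k acc; simp [pvHLoopSub]
  | succ n ih =>
    intro k acc
    rw [pvHLoopSub, List.range_succ_eq_map]
    simp only [pvBwd_step, pvCB_toggle]
    have ih' := ih (k + 1) (acc ++ [pvBwd D g m ((k : Int) + 1)])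
    push_cast at ih'
    rw [ih']
    simp [List.map_map, Function.comp_def]
    intro t _
    congr 1
    ring

lemma pvVLoopAdd_closed (D g m i : Int) (n : Nat) : ∀ (k : Nat) (acc : List (List Int)),
    pvVLoopAdd [g * 2, (D - g) * 2] i n (pvFwd D g m k) (pvCF k) acc
      = acc ++ (List.range n).map (fun t => [i, pvFwd D g m ((k + t : Nat) + 1 : Int)]) := by
  induction n with
  | zero => intro k acc; simp [pvVLoopAdd]
  | succ n ih =>
    intro k acc
    rw [pvVLoopAdd, List.range_succ_eq_map]
    simp only [pvFwd_step, pvCF_toggle]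
    have ih' := ih (k + 1) (acc ++ [[i, pvFwd D g m ((k : Int) + 1)]])
    push_cast at ih'
    rw [ih']
    simp [List.map_map, Function.comp_def]
    intro t _
    congr 1
    ring

lemma pvVLoopSub_closed (D g m i : Int) (n : Nat) : ∀ (k : Nat) (acc : List (List Int)),
    pvVLoopSub [g * 2, (D - g) * 2] i n (pvBwd D g m k) (pvCB k) acc
      = acc ++ (List.range n).map (fun t => [i, pvBwd D g m ((k + t : Nat) + 1 : Int)]) := by
  induction n with
  | zero => intro k acc; simp [pvVLoopSub]
  | succ n ih =>
    intro k acc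
    rw [pvVLoopSub, List.range_succ_eq_map]
    simp only [pvBwd_step, pvCB_toggle]
    have ih' := ih (k + 1) (acc ++ [[i, pvBwd D g m ((k : Int) + 1)]])
    push_cast at ih'
    rw [ih']
    simp [List.map_map, Function.comp_def]
    intro t _
    congr 1
    ring

lemma pvFwd_zero (D g m : Int) : pvFwd D g m 0 = g - m := by
  simp [pvFwd]
lemma pvBwd_zero (D g m : Int) : pvBwd D g m 0 = g - m := by
  simp [pvBwd]

lemma pv_map_cast {α : Type} (f : Int → α) (l : List Nat) :
    List.map f (List.flatMap (fun a : Nat => [(a : Int)]) l) = List.map (fun t : Nat => f t) l := by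
  induction l with
  | nil => simp
  | cons a l ih => simp [ih]

lemma pvOuter_closed (D g m : Int) (vb : Nat) : ∀ (xs : List Int) (acc : List (List Int)),
    pvOuter [g * 2, (D - g) * 2] (g - m) vb xs acc
      = acc ++ xs.flatMap (fun i =>
          (if i ≠ 0 then [[i, 0]] else []) ++
          (List.range vb).map (fun t => [i, pvFwd D g m ((t : Int) + 1)]) ++
          (List.range vb).map (fun t => [i, pvBwd D g m ((t : Int) + 1)])) := by
  intro xs
  induction xs with
  | nil => intro acc; simp [pvOuter]
  | cons i rest ih =>
    intro acc
    rw [pvOuter]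
    have hA := pvVLoopAdd_closed D g m i vb 0
    have hB := pvVLoopSub_closed D g m i vb 0
    norm_num [pvFwd_zero, pvBwd_zero, pvCF, pvCB] at hA hB
    rw [hA, hB, ih, List.flatMap_cons]
    by_cases hi : i = 0 <;> simp [hi, List.append_assoc, pv_map_cast]

-- ===== VERDICT (by name: the statement is the Claim_ definition above) =====
theorem create_map_g_spec : Claim_equal_create_map_g := by
  intro dimension mpos gpos distance _hdom _hpre
  show create_map_g dimension mpos gpos distance = create_map_g_alt dimension mpos gpos distance
  simp only [create_map_g, create_map_g_alt]
  generalize (PySem.List.pyGet? dimension 0).getD 0 = D0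
  generalize (PySem.List.pyGet? dimension 1).getD 0 = D1
  generalize (PySem.List.pyGet? mpos 0).getD 0 = m0
  generalize (PySem.List.pyGet? mpos 1).getD 0 = m1
  generalize (PySem.List.pyGet? gpos 0).getD 0 = g0
  generalize (PySem.List.pyGet? gpos 1).getD 0 = g1
  generalize (Int.tdiv (distance + 2 * D0) D0).toNat = h
  generalize (Int.tdiv (distance + 2 * D1) D1).toNat = v
  have hA := pvHLoopAdd_closed D0 g0 m0 h 0
  have hS := pvHLoopSub_closed D0 g0 m0 h 0
  norm_num [pvFwd_zero, pvBwd_zero, pvCF, pvCB] at hA hS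
  rw [hA, hS, pvOuter_closed D1 g1 m1 v]
  simp [List.map_map, Function.comp_def, List.flatMap_append, List.append_assoc, pv_map_cast]
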